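-- pv_equiv track=rewrite | github.com/amrayach/mmrag | scripts/inspect_retrieval_trace.py | _select_records
-- ===== SOURCE A (Python) =====
-- def _strip_at_filter(text: str) -> str:
--     """Strip a leading ``@filter `` token from a query so we substring-match
--     on the substantive part. Matches the convention used by
--     ``eval_retrieval_metrics.match_traces_to_prompts``."""
--     t = text.strip()
--     if t.startswith("@"):
--         sp = t.find(" ")
--         if sp > 0:
--             t = t[sp + 1:]
--     return t
--
-- def _select_records(
--     records: list[dict],
--     query_hint: str | None,
-- ) -> tuple[list[dict], dict | None]:
--     """Return (all_matching_records, selected_record). If a ``query_hint`` is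
--     provided, match by substring against ``raw_user_query``. Otherwise return
--     every record. The selected record is the most-recent timestamp among
--     matches."""
--     if not records:
--         return [], None
--
--     if query_hint:
--         needle = _strip_at_filter(query_hint).lower()[:60].strip()
--         candidates = [
--             r for r in records
--             if needle and needle in (r.get("raw_user_query") or "").lower()
--         ]
--     else:
--         candidates = list(records)
--
--     if not candidates:
--         return [], None
--
--     def _ts(r: dict) -> str:
--         return r.get("timestamp") or ""
--
--     candidates_sorted = sorted(candidates, key=_ts)
--     return candidates, candidates_sorted[-1]
-- ===== SOURCE B (Python) =====
-- def _strip_at_filter(text: str) -> str: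
--     t = text.strip()
--     if t.startswith("@"):
--         sp = t.find(" ")
--         if sp > 0:
--             t = t[sp + 1:]
--     return t
--
--
-- def _select_records(records, query_hint):
--     if query_hint:
--         needle = _strip_at_filter(query_hint).lower()[:60].strip()
--         candidates = [
--             r for r in records
--             if needle and needle in (r.get("raw_user_query") or "").lower()
--         ]
--     else:
--         candidates = list(records)
--     if not candidates:
--         return [], None
--     best = candidates[0]
--     best_ts = best.get("timestamp") or ""
--     for r in candidates[1:]:
--         ts = r.get("timestamp") or ""
--         if ts >= best_ts:
--             best, best_ts = r, ts
--     return candidates, best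
-- ===== Notes on version B (the rewrite author's own statement) =====
-- stated objective: alternative
-- what changed: Replaces the full stable sort of the candidate list plus taking the last element with a single running-maximum pass that keeps the last record whose timestamp is >= the current best, matching the stable sort's last-of-ties behaviour.
import Mathlib
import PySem

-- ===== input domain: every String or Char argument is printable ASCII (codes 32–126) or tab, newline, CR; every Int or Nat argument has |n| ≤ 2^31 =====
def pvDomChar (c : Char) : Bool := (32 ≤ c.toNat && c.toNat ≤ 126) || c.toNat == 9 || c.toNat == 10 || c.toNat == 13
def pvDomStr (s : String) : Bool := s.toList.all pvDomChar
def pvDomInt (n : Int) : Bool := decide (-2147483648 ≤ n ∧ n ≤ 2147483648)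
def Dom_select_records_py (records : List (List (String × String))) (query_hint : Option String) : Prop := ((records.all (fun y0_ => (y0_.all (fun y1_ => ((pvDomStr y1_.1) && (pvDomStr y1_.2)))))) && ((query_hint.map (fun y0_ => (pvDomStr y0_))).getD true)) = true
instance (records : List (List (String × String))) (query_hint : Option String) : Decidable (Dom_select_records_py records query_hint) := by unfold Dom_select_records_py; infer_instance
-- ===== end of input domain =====

-- B replaces A's "stable-sort candidates by timestamp, take the last element" with one linear
-- running-maximum pass that keeps the LAST record whose timestamp ties the current best
-- (same filtering); return value only, neither mutates its arguments.

-- ===== PORT A =====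
-- helper _strip_at_filter (identical source in Source A and Source B, so shared by both ports)
def pvStripAtFilter (text : String) : String :=
  let t := PySem.Str.strip text
  if PySem.Str.startswith t "@" then
    let sp := PySem.Str.find t " "
    if 0 < sp then PySem.Str.slice t (some (sp + 1)) none else t
  else t

-- r.get("timestamp") or ""  (a present-but-empty value and a missing key both give "")
def pvTs (r : List (String × String)) : String :=
  ((PySem.Dict.mk r).get? "timestamp").getD ""

-- the candidate-filtering phase, identical source in Source A and Source B, shared by both ports
def pvCandidates (records : List (List (String × String))) (query_hint : Option String) : List (List (String × String)) :=
  match query_hint with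
  | some q =>
    if q = "" then records
    else
      let needle := PySem.Str.strip (PySem.Str.slice (PySem.Str.lower (pvStripAtFilter q)) none (some 60))
      records.filter (fun r =>
        (needle != "") && PySem.Str.isIn needle (PySem.Str.lower (((PySem.Dict.mk r).get? "raw_user_query").getD "")))
  | none => records

def select_records_py (records : List (List (String × String))) (query_hint : Option String) : (List (List (String × String))) × (Option (List (String × String))) :=
  if records = [] then ([], none)
  else
    let candidates := pvCandidates records query_hint
    if candidates = [] then ([], none)
    else
      let candidates_sorted := PySem.List.sorted candidates (fun r => pvTs r)
      (candidates, PySem.List.pyGet? candidates_sorted (-1))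

-- ===== PORT B =====
def select_records_py_alt (records : List (List (String × String))) (query_hint : Option String) : (List (List (String × String))) × (Option (List (String × String))) :=
  match pvCandidates records query_hint with
  | [] => ([], none)
  | c :: t =>
    let best := t.foldl (fun b r =>
        let ts := pvTs r
        if b.2 ≤ ts then (r, ts) else b) (c, pvTs c)
    (c :: t, some best.1)

-- ===== PRECONDITION & SPEC =====
def Spec_select_records_py (records : List (List (String × String))) (query_hint : Option String) (out : (List (List (String × String))) × (Option (List (String × String)))) : Prop := out = select_records_py_alt records query_hint
instance (records : List (List (String × String))) (query_hint : Option String) (out : (List (List (String × String))) × (Option (List (String × String)))) : Decidable (Spec_select_records_py records query_hint out) := by unfold Spec_select_records_py; infer_instance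

-- ===== CLAIM (what is proved, stated in full; the proofs are below) =====
def Claim_equal_select_records_py : Prop := ∀ (records : List (List (String × String))) (query_hint : Option String), Dom_select_records_py records query_hint → Spec_select_records_py records query_hint (select_records_py records query_hint)

-- ===== LEMMAS AND PROOFS =====

theorem pv_insertBy_ne_nil {α : Type} (before : α → α → Bool) (x : α) (ys : List α) :
    PySem.List.insertBy before x ys ≠ [] := by
  cases ys with
  | nil => simp [PySem.List.insertBy]
  | cons y ys => simp only [PySem.List.insertBy]; split <;> simp

-- last of a stable insertion into a key-sorted list: the new element wins exactly on ≥ ties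
theorem pv_insertBy_getLast? {α : Type} (key : α → String) (x : α) :
    ∀ (ys : List α), ys.Pairwise (fun a b => key a ≤ key b) →
      (PySem.List.insertBy (fun a b => decide (key a < key b)) x ys).getLast? =
        some (match ys.getLast? with
              | none => x
              | some l => if key l ≤ key x then x else l) := by
  intro ys
  induction ys with
  | nil => intro _; simp [PySem.List.insertBy]
  | cons y ys IH =>
    intro hpw
    rcases List.pairwise_cons.mp hpw with ⟨hy, hpw'⟩
    simp only [PySem.List.insertBy]
    by_cases hlt : key x < key y
    · rw [if_pos (by simpa using hlt), List.getLast?_cons_cons]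
      rcases hl : (y :: ys).getLast? with _ | l
      · simp at hl
      · have hmem : l ∈ y :: ys := List.mem_of_getLast? hl
        have hyl : key y ≤ key l := by
          rcases List.mem_cons.mp hmem with rfl | hmem'
          · exact le_refl _
          · exact hy l hmem'
        have : ¬ key l ≤ key x := by
          intro hle; exact absurd (lt_of_lt_of_le hlt (le_trans hyl hle)) (lt_irrefl _)
        simp [this]
    · rw [if_neg (by simpa using hlt)]
      have hyx : key y ≤ key x := le_of_not_gt hlt
      cases ys with
      | nil => simp [PySem.List.insertBy, hyx]
      | cons z zs =>
        rcases hz : PySem.List.insertBy (fun a b => decide (key a < key b)) x (z :: zs) with _ | ⟨w, ws⟩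
        · exact absurd hz (pv_insertBy_ne_nil _ _ _)
        · rw [List.getLast?_cons_cons, ← hz, IH hpw', List.getLast?_cons_cons]

-- the last element of sorted(c :: t, key) is the running max (last of ties) over the list
theorem pv_sorted_getLast? {α : Type} (key : α → String) (c : α) (t : List α) :
    (PySem.List.sorted (c :: t) key).getLast? =
      some (t.foldl (fun b r => if key b ≤ key r then r else b) c) := by
  induction t using List.reverseRecOn with
  | nil => rw [PySem.List.sorted_eq_foldl_insertBy]; simp [PySem.List.insertBy]
  | append_singleton t x IH =>
    have hfold : List.foldl (fun acc y => PySem.List.insertBy (fun a b => decide (key a < key b)) y acc) [] (c :: t) = PySem.List.sorted (c :: t) key := (PySem.List.sorted_eq_foldl_insertBy (c :: t) key).symm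
    rw [PySem.List.sorted_eq_foldl_insertBy]
    have hsplit : (c :: (t ++ [x])) = (c :: t) ++ [x] := by simp
    rw [hsplit, List.foldl_append, hfold]
    simp only [List.foldl_cons, List.foldl_nil]
    rw [pv_insertBy_getLast? key x _ (PySem.List.sorted_pairwise (c :: t) key), IH, List.foldl_append]
    simp only [List.foldl_cons, List.foldl_nil]

-- the pair-state fold of port B carries exactly (running best, its key)
theorem pv_foldl_pair {α : Type} (key : α → String) :
    ∀ (t : List α) (c : α),
      t.foldl (fun b r => let ts := key r; if b.2 ≤ ts then (r, ts) else b) (c, key c) =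
        (t.foldl (fun b r => if key b ≤ key r then r else b) c,
         key (t.foldl (fun b r => if key b ≤ key r then r else b) c)) := by
  intro t
  induction t with
  | nil => intro c; rfl
  | cons r t IH =>
    intro c
    simp only [List.foldl_cons]
    by_cases h : key c ≤ key r
    · simpa [h] using IH r
    · simpa [h] using IH c

theorem pv_candidates_nil (query_hint : Option String) : pvCandidates [] query_hint = [] := by
  cases query_hint with
  | none => rfl
  | some q => simp [pvCandidates]

-- ===== VERDICT (by name: the statement is the Claim_ definition above) =====
theorem select_records_py_spec : Claim_equal_select_records_py := by
  intro records query_hint _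
  unfold Spec_select_records_py select_records_py select_records_py_alt
  by_cases hrec : records = []
  · subst hrec
    simp [pv_candidates_nil]
  · rw [if_neg hrec]
    rcases hc : pvCandidates records query_hint with _ | ⟨c, t⟩
    · simp
    · simp only [List.cons_ne_nil, if_neg, not_false_eq_true]
      rw [PySem.List.pyGet?_neg_one, pv_sorted_getLast? (fun r => pvTs r) c t,
          pv_foldl_pair (fun r => pvTs r) t c]
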